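-- pv_equiv track=rewrite | github.com/jlaine/pyguitar | scripts/pyguitar.py | parse_strum_pattern
-- ===== SOURCE A (Python) =====
-- from typing import Dict, List, Tuple
--
-- def parse_strum_pattern(pattern: str, beat_time=480) -> List[List[Tuple[str, int]]]:
--     output = []
--     for chunk in pattern.split("/"):
--         events = []
--         assert chunk[0] in ("D", "U"), "strum pattern chunk must start with a strum"
--         for strum in chunk:
--             if strum in ("D", "U"):
--                 events += [
--                     ("note_on", 0),
--                     ("note_off", int(beat_time / 2)),
--                 ]
--             else:
--                 assert strum == "-"
--                 events[-1] = (events[-1][0], events[-1][1] + int(beat_time / 2))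
--         output.append(events)
--     return output
-- ===== SOURCE B (Python) =====
-- def parse_strum_pattern(pattern, beat_time=480):
--     half = int(beat_time / 2)
--     output = []
--     for chunk in pattern.split("/"):
--         assert chunk[0] in ("D", "U"), "strum pattern chunk must start with a strum"
--         # pass 1: tokenize into dash-counts, one entry per strum
--         groups = []
--         for ch in chunk:
--             if ch in ("D", "U"):
--                 groups.append(0)
--             else:
--                 assert ch == "-"
--                 groups[-1] += 1
--         # pass 2: emit events with a closed-form note length
--         events = []
--         for n in groups:
--             events.append(("note_on", 0))
--             events.append(("note_off", half * (n + 1)))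
--         output.append(events)
--     return output
-- ===== Notes on version B (the rewrite author's own statement) =====
-- stated objective: alternative
-- what changed: Replaces A's single mutate-last-event-in-place loop by a tokenize-then-emit decomposition: a first pass groups each strum with its dash count, a second pass emits the events with the closed-form note length half*(dashes+1).
import Mathlib
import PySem

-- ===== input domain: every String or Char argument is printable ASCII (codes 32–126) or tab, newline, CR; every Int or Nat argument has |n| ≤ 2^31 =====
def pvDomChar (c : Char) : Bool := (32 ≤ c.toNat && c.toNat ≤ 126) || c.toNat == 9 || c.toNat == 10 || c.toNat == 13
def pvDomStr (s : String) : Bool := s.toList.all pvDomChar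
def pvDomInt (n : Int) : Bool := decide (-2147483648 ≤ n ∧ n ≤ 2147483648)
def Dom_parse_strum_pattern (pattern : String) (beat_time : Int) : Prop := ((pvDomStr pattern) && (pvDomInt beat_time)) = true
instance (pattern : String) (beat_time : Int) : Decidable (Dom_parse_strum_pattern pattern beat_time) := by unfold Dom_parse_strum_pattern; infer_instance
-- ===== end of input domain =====

-- B replaces A's mutate-last-event loop by a tokenize-then-emit decomposition (same cost).

-- ===== PORT A =====
-- events[-1] = (events[-1][0], events[-1][1] + half): update of the last element
-- (Python raises IndexError on an empty list; that input is excluded by Pre_, the port leaves [] unchanged)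
def pvA_updLast (events : List (String × Int)) (half : Int) : List (String × Int) :=
  match events.getLast? with
  | some e => events.dropLast ++ [(e.1, e.2 + half)]
  | none => events

-- the inner `for strum in chunk` loop of A, state = events
def pvA_chunk (half : Int) (chunk : List Char) : List (String × Int) :=
  chunk.foldl (fun events strum =>
    if strum = 'D' ∨ strum = 'U' then
      events ++ [("note_on", 0), ("note_off", half)]
    else
      pvA_updLast events half) []

-- int(beat_time / 2): float true division then truncation toward zero; exact for |beat_time| ≤ 2^31, = Int.tdiv
def parse_strum_pattern (pattern : String) (beat_time : Int) : List (List (String × Int)) :=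
  (PySem.Chars.splitOn pattern.toList "/".toList).map (fun chunk => pvA_chunk (Int.tdiv beat_time 2) chunk)

-- ===== PORT B =====
-- pass 1 of B: one dash count per strum; groups[-1] += 1 transliterated like pvA_updLast
def pvB_groups (chunk : List Char) : List Int :=
  chunk.foldl (fun gs ch =>
    if ch = 'D' ∨ ch = 'U' then gs ++ [(0 : Int)]
    else match gs.getLast? with
         | some n => gs.dropLast ++ [n + 1]
         | none => gs) []

-- pass 2 of B: emit the events, closed-form note length
def pvB_emit (half : Int) (groups : List Int) : List (String × Int) :=
  groups.foldl (fun events n =>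
    events ++ [("note_on", 0), ("note_off", half * (n + 1))]) []

def parse_strum_pattern_alt (pattern : String) (beat_time : Int) : List (List (String × Int)) :=
  (PySem.Chars.splitOn pattern.toList "/".toList).map
    (fun chunk => pvB_emit (Int.tdiv beat_time 2) (pvB_groups chunk))

-- ===== PRECONDITION & SPEC =====
-- Pre_ excludes exactly the inputs where Python A raises: an empty chunk (IndexError on chunk[0]),
-- a chunk not starting with D/U, or a character other than D/U/- (AssertionError).
def pvPreB (pattern : String) : Bool :=
  (PySem.Chars.splitOn pattern.toList "/".toList).all fun chunk =>
    (chunk.head? == some 'D' || chunk.head? == some 'U') &&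
    chunk.all fun c => c == 'D' || c == 'U' || c == '-'
def Pre_parse_strum_pattern (pattern : String) (beat_time : Int) : Prop :=
  pvPreB pattern = true
instance (pattern : String) (beat_time : Int) : Decidable (Pre_parse_strum_pattern pattern beat_time) := by
  unfold Pre_parse_strum_pattern; infer_instance

def pvWitness_parse_strum_pattern : String × Int := ("D", 2)

def Spec_parse_strum_pattern (pattern : String) (beat_time : Int) (out : List (List (String × Int))) : Prop := out = parse_strum_pattern_alt pattern beat_time
instance (pattern : String) (beat_time : Int) (out : List (List (String × Int))) : Decidable (Spec_parse_strum_pattern pattern beat_time out) := by unfold Spec_parse_strum_pattern; infer_instance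

-- ===== CLAIM (what is proved, stated in full; the proofs are below) =====
def Claim_equal_parse_strum_pattern : Prop := ∀ (pattern : String) (beat_time : Int), Dom_parse_strum_pattern pattern beat_time → Pre_parse_strum_pattern pattern beat_time → Spec_parse_strum_pattern pattern beat_time (parse_strum_pattern pattern beat_time)

-- ===== LEMMAS AND PROOFS =====

-- emitting groups ++ [n] appends one pair of events
theorem pvB_emit_append (half : Int) (gs : List Int) (n : Int) :
    pvB_emit half (gs ++ [n]) = pvB_emit half gs ++ [("note_on", 0), ("note_off", half * (n + 1))] := by
  simp [pvB_emit]

-- a dash on A's side matches incrementing the last group on B's side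
theorem pvA_updLast_emit (half : Int) (gs : List Int) :
    pvA_updLast (pvB_emit half gs) half =
      pvB_emit half (match gs.getLast? with
                     | some n => gs.dropLast ++ [n + 1]
                     | none => gs) := by
  rcases h : gs.getLast? with _ | n
  · simp [List.getLast?_eq_none_iff] at h
    subst h; simp [pvB_emit, pvA_updLast]
  · obtain ⟨gs', rfl⟩ : ∃ gs', gs = gs' ++ [n] := by
      rcases List.eq_nil_or_concat gs with rfl | ⟨gs', m, hgs⟩
      · simp at h
      · rw [List.concat_eq_append] at hgs
        subst hgs; simp at h; subst h; exact ⟨gs', rfl⟩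
    simp [pvB_emit_append, pvA_updLast]
    ring

-- loop invariant: A's events = emit of B's groups, over any chunk and any aligned states
theorem pvA_chunk_eq_aux (half : Int) (chunk : List Char) (gs : List Int) :
    chunk.foldl (fun events strum =>
      if strum = 'D' ∨ strum = 'U' then events ++ [("note_on", 0), ("note_off", half)]
      else pvA_updLast events half) (pvB_emit half gs)
    = pvB_emit half (chunk.foldl (fun gs ch =>
        if ch = 'D' ∨ ch = 'U' then gs ++ [(0 : Int)]
        else match gs.getLast? with
             | some n => gs.dropLast ++ [n + 1]
             | none => gs) gs) := by
  induction chunk generalizing gs with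
  | nil => rfl
  | cons c cs ih =>
    simp only [List.foldl_cons]
    by_cases hc : c = 'D' ∨ c = 'U'
    · simp only [if_pos hc]
      rw [show pvB_emit half gs ++ [("note_on", (0:Int)), ("note_off", half)]
            = pvB_emit half (gs ++ [0]) by simp [pvB_emit_append]]
      exact ih (gs ++ [0])
    · simp only [if_neg hc]
      rw [pvA_updLast_emit]
      exact ih _

theorem pvA_chunk_eq (half : Int) (chunk : List Char) :
    pvA_chunk half chunk = pvB_emit half (pvB_groups chunk) := by
  have := pvA_chunk_eq_aux half chunk []
  simpa [pvA_chunk, pvB_groups, pvB_emit] using this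

-- ===== VERDICT (by name: the statement is the Claim_ definition above) =====
theorem parse_strum_pattern_spec : Claim_equal_parse_strum_pattern := by
  intro pattern beat_time _ _
  unfold Spec_parse_strum_pattern parse_strum_pattern parse_strum_pattern_alt
  simp only [pvA_chunk_eq]
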